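-- pv_equiv track=rewrite | github.com/astatine210/Advent-Of-Code | 2022/08/treehouses.py | scenic_scores
-- ===== SOURCE A (Python) =====
-- def scenic_scores(forest):
--     """Yield scenic scores for all trees not on the edge of the forest"""
--
--     width = len(forest)
--     for row in range(1, width - 1):
--         for column in range(1, width - 1):
--             height = forest[row][column]
--             total_viewed = 1
--
--             distance = 0
--             for x in range(column - 1, -1, -1):
--                 distance += 1
--                 if forest[row][x] >= height:
--                     break
--             total_viewed *= distance
--
--             distance = 0
--             for y in range(row - 1, -1, -1):
--                 distance += 1
--                 if forest[y][column] >= height: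
--                     break
--             total_viewed *= distance
--
--             distance = 0
--             for x in range(column + 1, width):
--                 distance += 1
--                 if forest[row][x] >= height:
--                     break
--             total_viewed *= distance
--
--             distance = 0
--             for y in range(row + 1, width):
--                 distance += 1
--                 if forest[y][column] >= height:
--                     break
--             total_viewed *= distance
--
--             yield total_viewed
-- ===== SOURCE B (Python) =====
-- def _sweep_fwd(vals):
--     """For each index c: viewing distance looking back (toward index 0):
--     distance to the nearest j < c with vals[j] >= vals[c], or c if none."""
--     n = len(vals)
--     stack = []
--     out = []
--     for c in range(n):
--         while stack and vals[stack[-1]] < vals[c]: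
--             stack.pop()
--         out.append(c - stack[-1] if stack else c)
--         stack.append(c)
--     return out
--
--
-- def _sweep_bwd(vals):
--     """Mirror of _sweep_fwd: viewing distance looking forward (toward index n-1)."""
--     n = len(vals)
--     stack = []
--     out = []
--     for c in reversed(range(n)):
--         while stack and vals[stack[-1]] < vals[c]:
--             stack.pop()
--         out.append(stack[-1] - c if stack else n - 1 - c)
--         stack.append(c)
--     out.reverse()
--     return out
--
--
-- def scenic_scores(forest):
--     """Yield scenic scores for all trees not on the edge of the forest.
--
--     One monotonic-stack sweep per row/column and direction."""
--     n = len(forest)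
--     if n < 3:
--         return
--     cols = [[forest[r][c] for r in range(n)] for c in range(n)]
--     lefts = [_sweep_fwd(row) for row in forest]
--     rights = [_sweep_bwd(row) for row in forest]
--     ups = [_sweep_fwd(col) for col in cols]
--     downs = [_sweep_bwd(col) for col in cols]
--     for r in range(1, n - 1):
--         for c in range(1, n - 1):
--             yield lefts[r][c] * rights[r][c] * ups[c][r] * downs[c][r]
-- ===== Notes on version B (the rewrite author's own statement) =====
-- stated objective: alternative
-- what changed: Replaces the per-tree rescans in all four directions by one monotonic-stack sweep per row/column and direction that precomputes every nearest-taller-or-equal viewing distance, then multiplies the four table entries per interior tree.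
-- outside the precondition, e.g. on scenic_scores([[5, 5, 5, 0], [5, 1, 0, 0], [5, 5, 5, 0]]): A returns [1], B returns [2]; on scenic_scores([[5, 9], [1, 2, 3], [4, 5, 6]]): A returns [1], B raises IndexError
import Mathlib
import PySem

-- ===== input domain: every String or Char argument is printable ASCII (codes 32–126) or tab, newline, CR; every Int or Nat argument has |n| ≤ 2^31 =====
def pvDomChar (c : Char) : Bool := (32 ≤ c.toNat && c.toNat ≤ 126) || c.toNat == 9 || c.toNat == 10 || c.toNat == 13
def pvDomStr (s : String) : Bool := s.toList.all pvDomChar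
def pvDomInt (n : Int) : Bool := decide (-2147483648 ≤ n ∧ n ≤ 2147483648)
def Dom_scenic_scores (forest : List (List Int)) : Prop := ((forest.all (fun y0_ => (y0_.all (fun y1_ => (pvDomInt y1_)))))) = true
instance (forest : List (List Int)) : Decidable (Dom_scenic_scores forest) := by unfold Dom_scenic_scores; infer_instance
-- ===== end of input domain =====

-- B replaces A's per-tree rescans in all four directions by one monotonic-stack sweep per
-- row/column and direction (objective: alternative algorithm, same exact results).

-- ===== PORT A =====
-- forest[i][j]; totalized with defaults — every access is in range under Pre_.
def pvGetA (forest : List (List Int)) (i j : Int) : Int :=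
  PySem.List.pyGetD (PySem.List.pyGetD forest i []) j 0

-- 'distance = 0; for x in idxs: distance += 1; if g(x) >= h: break' — returns the final distance.
def distLoop (g : Int → Int) (h : Int) : List Int → Int
  | [] => 0
  | x :: rest => if h ≤ g x then 1 else 1 + distLoop g h rest

def scenic_scores (forest : List (List Int)) : List Int :=
  -- width = len(forest); height and the running product total_viewed are inlined
  (PySem.List.pyRange 1 ((forest.length : Int) - 1) 1).flatMap fun row =>
    (PySem.List.pyRange 1 ((forest.length : Int) - 1) 1).map fun column =>
      1 * distLoop (fun x => pvGetA forest row x) (pvGetA forest row column)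
            (PySem.List.pyRange (column - 1) (-1) (-1))
        * distLoop (fun y => pvGetA forest y column) (pvGetA forest row column)
            (PySem.List.pyRange (row - 1) (-1) (-1))
        * distLoop (fun x => pvGetA forest row x) (pvGetA forest row column)
            (PySem.List.pyRange (column + 1) (forest.length : Int) 1)
        * distLoop (fun y => pvGetA forest y column) (pvGetA forest row column)
            (PySem.List.pyRange (row + 1) (forest.length : Int) 1)

-- ===== PORT B =====
-- 'while stack and vals[stack[-1]] < v: stack.pop()'
def popW (vals : List Int) (v : Int) : List Nat → List Nat
  | [] => []
  | x :: st => if vals.getD x 0 < v then popW vals v st else x :: st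

-- _sweep_fwd: one pass c = 0..n-1 over (stack, out).
def sweepFwd (vals : List Int) : List Int :=
  ((List.range vals.length).foldl
    (fun (acc : List Nat × List Int) c =>
      let st := popW vals (vals.getD c 0) acc.1
      (c :: st,
        acc.2 ++ [match st with
          | x :: _ => (c : Int) - (x : Int)
          | [] => (c : Int)]))
    ([], [])).2

-- _sweep_bwd: pass over reversed(range(n)), then out.reverse().
def sweepBwd (vals : List Int) : List Int :=
  (((List.range vals.length).reverse.foldl
    (fun (acc : List Nat × List Int) c =>
      let st := popW vals (vals.getD c 0) acc.1
      (c :: st,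
        acc.2 ++ [match st with
          | x :: _ => (x : Int) - (c : Int)
          | [] => (vals.length : Int) - 1 - (c : Int)]))
    ([], [])).2).reverse

-- cols = [[forest[r][c] for r in range(n)] for c in range(n)]
def colsOf (forest : List (List Int)) : List (List Int) :=
  (List.range forest.length).map fun c =>
    (List.range forest.length).map fun r => (forest.getD r []).getD c 0

def scenic_scores_alt (forest : List (List Int)) : List Int :=
  -- lefts = forest.map sweepFwd, rights = forest.map sweepBwd,
  -- ups = cols.map sweepFwd, downs = cols.map sweepBwd (inlined below)
  if forest.length < 3 then [] else
    (List.range' 1 (forest.length - 2)).flatMap fun r =>      -- range(1, n-1)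
      (List.range' 1 (forest.length - 2)).map fun c =>
        ((forest.map sweepFwd).getD r []).getD c 0
          * ((forest.map sweepBwd).getD r []).getD c 0
          * (((colsOf forest).map sweepFwd).getD c []).getD r 0
          * (((colsOf forest).map sweepBwd).getD c []).getD r 0

-- ===== PRECONDITION & SPEC =====
-- Pre_ excludes non-square forests with more than two rows: there A indexes a width×width
-- region fixed by the ROW count alone — it raises IndexError as soon as a row is too short,
-- and where longer rows let it return, the value (ignoring trees beyond column width-1) is an
-- accident of its square-grid assumption that B (which uses each row's real length) need not match.
def Pre_scenic_scores (forest : List (List Int)) : Prop :=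
  forest.length ≤ 2 ∨ ∀ row ∈ forest, row.length = forest.length
instance (forest : List (List Int)) : Decidable (Pre_scenic_scores forest) := by
  unfold Pre_scenic_scores; infer_instance

def pvWitness_scenic_scores : List (List Int) := [[3, 0, 3], [2, 5, 1], [0, 9, 3]]

def Spec_scenic_scores (forest : List (List Int)) (out : List Int) : Prop := out = scenic_scores_alt forest
instance (forest : List (List Int)) (out : List Int) : Decidable (Spec_scenic_scores forest out) := by unfold Spec_scenic_scores; infer_instance

-- ===== CLAIM (what is proved, stated in full; the proofs are below) =====
def Claim_equal_scenic_scores : Prop := ∀ (forest : List (List Int)), Dom_scenic_scores forest → Pre_scenic_scores forest → Spec_scenic_scores forest (scenic_scores forest)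

-- ===== LEMMAS AND PROOFS =====

-- Common specification: viewing distance toward index 0 ("backward") and toward n-1 ("forward").
def nearB (vals : List Int) (c : Nat) : Int :=
  match (List.range c).reverse.find? (fun x => decide (vals.getD c 0 ≤ vals.getD x 0)) with
  | some x => (c : Int) - (x : Int)
  | none => (c : Int)

def nearF (vals : List Int) (c : Nat) : Int :=
  match (List.range' (c + 1) (vals.length - (c + 1))).find? (fun x => decide (vals.getD c 0 ≤ vals.getD x 0)) with
  | some x => (x : Int) - (c : Int)
  | none => (vals.length : Int) - 1 - (c : Int)

-- ---- A-side: the linear scans compute nearB / nearF ----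

lemma pyRangeDesc (c : Nat) :
    PySem.List.pyRange ((c : Int) - 1) (-1) (-1) = (List.range c).reverse.map (fun x : Nat => (x : Int)) := by
  induction c with
  | zero => simpa using PySem.List.pyRange_neg_one_eq_nil (a := -1) (b := -1) le_rfl
  | succ c ih =>
      rw [show ((c + 1 : Nat) : Int) - 1 = (c : Int) by push_cast; ring]
      rw [PySem.List.pyRange_neg_one_cons (by omega)]
      rw [List.range_succ, List.reverse_append]
      simpa using ih

lemma pyRangeAux : ∀ (len a : Nat),
    PySem.List.pyRange (a : Int) ((a + len : Nat) : Int) 1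
      = (List.range' a len).map (fun x : Nat => (x : Int)) := by
  intro len
  induction len with
  | zero => intro a; simp [PySem.List.pyRange_one_eq_nil]
  | succ l ih =>
      intro a
      rw [PySem.List.pyRange_one_cons (by omega)]
      rw [show ((a : Int) + 1) = ((a + 1 : Nat) : Int) by push_cast; ring]
      rw [show ((a + (l + 1) : Nat) : Int) = (((a + 1) + l : Nat) : Int) by omega]
      rw [ih (a + 1), List.range'_succ, List.map_cons]

lemma distLoop_desc (vals : List Int) (g : Int → Int)
    (hg : ∀ x : Nat, g x = vals.getD x 0) (c : Nat) :
    distLoop g (vals.getD c 0) (PySem.List.pyRange ((c : Int) - 1) (-1) (-1)) = nearB vals c := by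
  rw [pyRangeDesc]
  unfold nearB
  generalize vals.getD c 0 = h
  induction c with
  | zero => simp [distLoop]
  | succ m ih =>
      rw [List.range_succ, List.reverse_append]
      simp only [List.reverse_cons, List.reverse_nil, List.nil_append, List.singleton_append,
        List.map_cons, List.find?]
      simp only [distLoop]
      rw [hg m]
      by_cases hm : h ≤ vals.getD m 0
      · rw [if_pos hm, decide_eq_true hm]
        push_cast; ring
      · rw [if_neg hm, decide_eq_false hm, ih]
        rcases hf : (List.range m).reverse.find? (fun x => decide (h ≤ vals.getD x 0)) with _ | x
        · push_cast; ring
        · push_cast; ring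

lemma distLoop_asc_aux (vals : List Int) (g : Int → Int)
    (hg : ∀ x : Nat, g x = vals.getD x 0) (h : Int) :
    ∀ (k a : Nat), distLoop g h ((List.range' a k).map (fun x : Nat => (x : Int)))
      = (match (List.range' a k).find? (fun x => decide (h ≤ vals.getD x 0)) with
          | some x => (x : Int) - (a : Int) + 1
          | none => (k : Int)) := by
  intro k
  induction k with
  | zero => intro a; simp [distLoop]
  | succ k ih =>
      intro a
      rw [List.range'_succ]
      simp only [List.map_cons, List.find?]
      simp only [distLoop]
      rw [hg a]
      by_cases ha : h ≤ vals.getD a 0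
      · rw [if_pos ha, decide_eq_true ha]
        push_cast; ring
      · rw [if_neg ha, decide_eq_false ha, ih (a + 1)]
        rcases hf : (List.range' (a + 1) k).find? (fun x => decide (h ≤ vals.getD x 0)) with _ | x
        · push_cast; ring
        · push_cast; ring

lemma distLoop_asc (vals : List Int) (g : Int → Int)
    (hg : ∀ x : Nat, g x = vals.getD x 0) (c : Nat) (hc : c < vals.length) :
    distLoop g (vals.getD c 0) (PySem.List.pyRange ((c : Int) + 1) (vals.length : Int) 1) = nearF vals c := by
  have hpr := pyRangeAux (vals.length - (c + 1)) (c + 1)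
  rw [show (((c + 1) + (vals.length - (c + 1)) : Nat) : Int) = (vals.length : Int) by omega] at hpr
  rw [show ((c : Int) + 1) = ((c + 1 : Nat) : Int) by push_cast; ring]
  rw [hpr]
  rw [distLoop_asc_aux vals g hg]
  unfold nearF
  rcases hf : (List.range' (c + 1) (vals.length - (c + 1))).find?
      (fun x => decide (vals.getD c 0 ≤ vals.getD x 0)) with _ | x
  · push_cast [Nat.cast_sub (by omega : c + 1 ≤ vals.length)]; ring
  · push_cast; ring

-- ---- B-side: the stack sweeps compute nearB / nearF ----

def stkStep (vals : List Int) (st : List Nat) (c : Nat) : List Nat :=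
  c :: popW vals (vals.getD c 0) st

def stkOf (vals : List Int) (P : List Nat) : List Nat := P.foldl (stkStep vals) []

lemma popW_popW (vals : List Int) (v v' : Int) (l : List Nat) (hvv : v ≤ v') :
    popW vals v' (popW vals v l) = popW vals v' l := by
  induction l with
  | nil => rfl
  | cons x t ih =>
      simp only [popW]
      by_cases hx : vals.getD x 0 < v
      · rw [if_pos hx, if_pos (lt_of_lt_of_le hx hvv), ih]
      · rw [if_neg hx]
        simp only [popW]

lemma popW_head (vals : List Int) (P : List Nat) (v : Int) :
    (popW vals v (stkOf vals P)).head? = P.reverse.find? (fun x => decide (v ≤ vals.getD x 0)) := by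
  induction P using List.reverseRecOn with
  | nil => simp [stkOf, popW]
  | append_singleton P b ih =>
      have hstk : stkOf vals (P ++ [b]) = b :: popW vals (vals.getD b 0) (stkOf vals P) := by
        simp [stkOf, List.foldl_append, stkStep]
      rw [hstk, List.reverse_append]
      simp only [List.reverse_cons, List.reverse_nil, List.nil_append, List.singleton_append,
        List.find?]
      by_cases hb : vals.getD b 0 < v
      · rw [decide_eq_false (by omega : ¬ v ≤ vals.getD b 0)]
        simp only [popW]
        rw [if_pos hb, popW_popW vals _ _ _ (le_of_lt hb), ih]
      · rw [decide_eq_true (by omega : v ≤ vals.getD b 0)]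
        simp only [popW]
        rw [if_neg hb]
        rfl

def outsF (vals : List Int) : List Nat → List Nat → List Int
  | _, [] => []
  | st, c :: rest =>
      (match popW vals (vals.getD c 0) st with
        | x :: _ => (c : Int) - (x : Int)
        | [] => (c : Int)) :: outsF vals (stkStep vals st c) rest

def outsB (vals : List Int) : List Nat → List Nat → List Int
  | _, [] => []
  | st, c :: rest =>
      (match popW vals (vals.getD c 0) st with
        | x :: _ => (x : Int) - (c : Int)
        | [] => (vals.length : Int) - 1 - (c : Int)) :: outsB vals (stkStep vals st c) rest

lemma foldF_eq (vals : List Int) :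
    ∀ (idxs : List Nat) (st : List Nat) (out : List Int),
      (idxs.foldl (fun (acc : List Nat × List Int) c =>
          let s := popW vals (vals.getD c 0) acc.1
          (c :: s,
            acc.2 ++ [match s with
              | x :: _ => (c : Int) - (x : Int)
              | [] => (c : Int)])) (st, out)).2
        = out ++ outsF vals st idxs := by
  intro idxs
  induction idxs with
  | nil => intro st out; simp [outsF]
  | cons c rest ih =>
      intro st out
      rw [List.foldl_cons, ih]
      simp [outsF, stkStep]

lemma foldB_eq (vals : List Int) :
    ∀ (idxs : List Nat) (st : List Nat) (out : List Int),
      (idxs.foldl (fun (acc : List Nat × List Int) c =>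
          let s := popW vals (vals.getD c 0) acc.1
          (c :: s,
            acc.2 ++ [match s with
              | x :: _ => (x : Int) - (c : Int)
              | [] => (vals.length : Int) - 1 - (c : Int)])) (st, out)).2
        = out ++ outsB vals st idxs := by
  intro idxs
  induction idxs with
  | nil => intro st out; simp [outsB]
  | cons c rest ih =>
      intro st out
      rw [List.foldl_cons, ih]
      simp [outsB, stkStep]

lemma getD_map_range_fn {α : Type} (f : Nat → α) (n k : Nat) (d : α) (hk : k < n) :
    ((List.range n).map f).getD k d = f k := by
  simp [List.getD_eq_getElem?_getD, List.getElem?_range hk]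

lemma getD_of_len_le {α : Type} (l : List α) (k : Nat) (d : α) (hk : l.length ≤ k) :
    l.getD k d = d := by
  simp [List.getD_eq_getElem?_getD, List.getElem?_eq_none hk]

lemma outsF_spec (vals : List Int) :
    ∀ (m k : Nat), outsF vals (stkOf vals (List.range k)) (List.range' k m)
      = (List.range' k m).map (nearB vals) := by
  intro m
  induction m with
  | zero => intro k; simp [outsF]
  | succ m ih =>
      intro k
      rw [List.range'_succ]
      simp only [outsF, List.map_cons]
      congr 1
      · have hh := popW_head vals (List.range k) (vals.getD k 0)
        rcases hpop : popW vals (vals.getD k 0) (stkOf vals (List.range k)) with _ | ⟨x, t⟩ <;>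
          rw [hpop] at hh <;> simp only [List.head?] at hh <;> unfold nearB <;> rw [← hh]
      · have hst : stkStep vals (stkOf vals (List.range k)) k = stkOf vals (List.range (k + 1)) := by
          rw [List.range_succ]
          simp [stkOf, List.foldl_append, stkStep]
        rw [hst]
        exact ih (k + 1)

lemma outsB_spec (vals : List Int) :
    ∀ (k : Nat), k ≤ vals.length →
      outsB vals (stkOf vals ((List.range' k (vals.length - k)).reverse)) ((List.range k).reverse)
        = ((List.range k).reverse).map (nearF vals) := by
  intro k
  induction k with
  | zero => intro _; simp [outsB]
  | succ k ih =>
      intro hk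
      rw [List.range_succ, List.reverse_append]
      simp only [List.reverse_cons, List.reverse_nil, List.nil_append, List.singleton_append,
        outsB, List.map_cons]
      congr 1
      · have hh := popW_head vals ((List.range' (k + 1) (vals.length - (k + 1))).reverse)
          (vals.getD k 0)
        rw [List.reverse_reverse] at hh
        rcases hpop : popW vals (vals.getD k 0)
            (stkOf vals ((List.range' (k + 1) (vals.length - (k + 1))).reverse)) with _ | ⟨x, t⟩ <;>
          rw [hpop] at hh <;> simp only [List.head?] at hh <;> unfold nearF <;> rw [← hh]
      · have hsplit : List.range' k (vals.length - k)
            = k :: List.range' (k + 1) (vals.length - (k + 1)) := by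
          rw [show vals.length - k = (vals.length - (k + 1)) + 1 by omega, List.range'_succ]
        have hst : stkStep vals (stkOf vals ((List.range' (k + 1) (vals.length - (k + 1))).reverse)) k
            = stkOf vals ((List.range' k (vals.length - k)).reverse) := by
          rw [hsplit, List.reverse_cons]
          simp [stkOf, List.foldl_append, stkStep]
        rw [hst]
        exact ih (by omega)

lemma sweepFwd_eq_map (vals : List Int) :
    sweepFwd vals = (List.range vals.length).map (nearB vals) := by
  unfold sweepFwd
  rw [foldF_eq]
  rw [show ([] : List Nat) = stkOf vals (List.range 0) from rfl]
  rw [show List.range vals.length = List.range' 0 vals.length from List.range_eq_range']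
  rw [outsF_spec]
  simp

lemma sweepBwd_eq_map (vals : List Int) :
    sweepBwd vals = (List.range vals.length).map (nearF vals) := by
  unfold sweepBwd
  rw [foldB_eq]
  have h0 : ([] : List Nat)
      = stkOf vals ((List.range' vals.length (vals.length - vals.length)).reverse) := by
    simp [stkOf]
  rw [h0, outsB_spec vals vals.length le_rfl]
  simp

-- ---- glue ----

def rowv (forest : List (List Int)) (r : Nat) : List Int := forest.getD r []

def colv (forest : List (List Int)) (c : Nat) : List Int :=
  (List.range forest.length).map fun r => (forest.getD r []).getD c 0

lemma rowv_len (forest : List (List Int))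
    (hsq : ∀ row ∈ forest, row.length = forest.length)
    (r : Nat) (hr : r < forest.length) : (rowv forest r).length = forest.length := by
  apply hsq
  rw [rowv, List.getD_eq_getElem _ _ hr]
  exact List.getElem_mem hr

lemma colv_len (forest : List (List Int)) (c : Nat) :
    (colv forest c).length = forest.length := by simp [colv]

lemma cellA_eq (forest : List (List Int))
    (hsq : ∀ row ∈ forest, row.length = forest.length)
    (r c : Nat) (hr : r < forest.length) (hc : c < forest.length) :
    1 * distLoop (fun x => pvGetA forest (r : Int) x) (pvGetA forest (r : Int) (c : Int))
          (PySem.List.pyRange ((c : Int) - 1) (-1) (-1))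
      * distLoop (fun y => pvGetA forest y (c : Int)) (pvGetA forest (r : Int) (c : Int))
          (PySem.List.pyRange ((r : Int) - 1) (-1) (-1))
      * distLoop (fun x => pvGetA forest (r : Int) x) (pvGetA forest (r : Int) (c : Int))
          (PySem.List.pyRange ((c : Int) + 1) (forest.length : Int) 1)
      * distLoop (fun y => pvGetA forest y (c : Int)) (pvGetA forest (r : Int) (c : Int))
          (PySem.List.pyRange ((r : Int) + 1) (forest.length : Int) 1)
      = nearB (rowv forest r) c * nearF (rowv forest r) c
          * nearB (colv forest c) r * nearF (colv forest c) r := by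
  have hgR : ∀ x : Nat, (fun x : Int => pvGetA forest (r : Int) x) (x : Int)
      = (rowv forest r).getD x 0 := by
    intro x; simp [pvGetA, rowv]
  have hgC : ∀ y : Nat, (fun y : Int => pvGetA forest y (c : Int)) (y : Int)
      = (colv forest c).getD y 0 := by
    intro y
    by_cases hy : y < forest.length
    · simp only [pvGetA, PySem.List.pyGetD_natCast]
      rw [colv, getD_map_range_fn _ _ _ _ hy]
    · simp only [pvGetA, PySem.List.pyGetD_natCast]
      rw [getD_of_len_le forest y [] (by omega)]
      rw [getD_of_len_le (colv forest c) y 0 (by rw [colv_len]; omega)]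
      simp
  have hrowlen := rowv_len forest hsq r hr
  have hcollen := colv_len forest c
  have hh : pvGetA forest (r : Int) (c : Int) = (rowv forest r).getD c 0 := hgR c
  have hh2 : pvGetA forest (r : Int) (c : Int) = (colv forest c).getD r 0 := hgC r
  have e1 := distLoop_desc (rowv forest r) (fun x : Int => pvGetA forest (r : Int) x) hgR c
  have e2 := distLoop_desc (colv forest c) (fun y : Int => pvGetA forest y (c : Int)) hgC r
  have e3 := distLoop_asc (rowv forest r) (fun x : Int => pvGetA forest (r : Int) x) hgR c (by omega)
  have e4 := distLoop_asc (colv forest c) (fun y : Int => pvGetA forest y (c : Int)) hgC r (by omega)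
  rw [hrowlen] at e3
  rw [hcollen] at e4
  rw [← hh] at e1 e3
  rw [← hh2] at e2 e4
  rw [e1, e2, e3, e4]
  ring

-- ===== VERDICT (by name: the statement is the Claim_ definition above) =====
theorem scenic_scores_spec : Claim_equal_scenic_scores := by
  intro forest _ hpre
  unfold Spec_scenic_scores
  show scenic_scores forest = scenic_scores_alt forest
  by_cases h3 : forest.length < 3
  · have hA : scenic_scores forest = [] := by
      unfold scenic_scores
      rw [PySem.List.pyRange_one_eq_nil (by omega)]
      rfl
    have hB : scenic_scores_alt forest = [] := by
      unfold scenic_scores_alt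
      rw [if_pos h3]
    rw [hA, hB]
  · have hsq : ∀ row ∈ forest, row.length = forest.length := by
      rcases hpre with h | h
      · omega
      · exact h
    have hrange : PySem.List.pyRange 1 ((forest.length : Int) - 1) 1
        = (List.range' 1 (forest.length - 2)).map (fun x : Nat => (x : Int)) := by
      have h := pyRangeAux (forest.length - 2) 1
      rw [show ((1 + (forest.length - 2) : Nat) : Int) = (forest.length : Int) - 1 by omega] at h
      rw [Nat.cast_one] at h
      exact h
    have hmem : ∀ {k : Nat}, k ∈ List.range' 1 (forest.length - 2)
        → 1 ≤ k ∧ k < forest.length := by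
      intro k hk
      obtain ⟨i, hi, rfl⟩ := List.mem_range'.mp hk
      omega
    unfold scenic_scores scenic_scores_alt
    rw [if_neg h3, hrange]
    rw [List.flatMap_map]
    apply List.flatMap_congr
    intro r hr
    obtain ⟨hr1, hrn⟩ := hmem hr
    rw [List.map_map]
    apply List.map_congr_left
    intro c hc
    obtain ⟨hc1, hcn⟩ := hmem hc
    simp only [Function.comp]
    have hlookL : ((forest.map sweepFwd).getD r []).getD c 0 = nearB (rowv forest r) c := by
      rw [List.getD_eq_getElem (forest.map sweepFwd) [] (by simpa using hrn), List.getElem_map]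
      rw [show forest[r] = rowv forest r from (List.getD_eq_getElem _ _ hrn).symm]
      rw [sweepFwd_eq_map, rowv_len forest hsq r hrn]
      exact getD_map_range_fn _ _ _ _ hcn
    have hlookR : ((forest.map sweepBwd).getD r []).getD c 0 = nearF (rowv forest r) c := by
      rw [List.getD_eq_getElem (forest.map sweepBwd) [] (by simpa using hrn), List.getElem_map]
      rw [show forest[r] = rowv forest r from (List.getD_eq_getElem _ _ hrn).symm]
      rw [sweepBwd_eq_map, rowv_len forest hsq r hrn]
      exact getD_map_range_fn _ _ _ _ hcn
    have hcols : colsOf forest = (List.range forest.length).map (colv forest) := rfl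
    have hlookU : (((colsOf forest).map sweepFwd).getD c []).getD r 0
        = nearB (colv forest c) r := by
      rw [hcols, List.map_map]
      rw [getD_map_range_fn _ _ _ _ hcn]
      simp only [Function.comp]
      rw [sweepFwd_eq_map, colv_len]
      exact getD_map_range_fn _ _ _ _ hrn
    have hlookD : (((colsOf forest).map sweepBwd).getD c []).getD r 0
        = nearF (colv forest c) r := by
      rw [hcols, List.map_map]
      rw [getD_map_range_fn _ _ _ _ hcn]
      simp only [Function.comp]
      rw [sweepBwd_eq_map, colv_len]
      exact getD_map_range_fn _ _ _ _ hrn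
    rw [hlookL, hlookR, hlookU, hlookD]
    exact cellA_eq forest hsq r c hrn hcn
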